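/- GENERATED by mk_final_copies.py from the proof of the farm's unit `compute_codewords.4` (farm:compute_codewords.4.1: Proof.lean) as the
   re-elaboration sweep compiled it — do not edit. -/
import Asan.CheckWalk
import Vorbis.Spec.Units.compute_codewords_4

/- THE WORKED PROOF OF THE UNIT compute_codewords.4 (segment 4 of the split of `compute_codewords`): from `cut3` 0x10827c (after the
   first `add_entry` has returned, assertion `At3 k`) through loop 1126 `for (i = 1; i <= len[k]; ++i) available[i] = 1U << (32 - i);`
   (its check site 0x108299 by `cw_check_available`; `len[k]` re-read unchecked through r14 at 0x1082a6), `++i` of `i = k + 1`, `m = 1`,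
   the shadow index saved to `[rsp+28H]`, to the head of the main loop (`cut8` 0x108345, assertion `AtMain (k + 1)`).
   `cw4_walk` is the farm worker's continuation-passing walk (its `seg4`, which now also hands the continuation the windows written:
   a dead return address, `available[·]`, the slot `[rsp+28H]`); the tree's `cw_len_kept` reads `len[j]` in a memory of the body; the unit
   theorem feeds the walk the fields of `At3` and rebuilds `AtMain` at the exit. -/
open X86 X86.User Asan Vorbis Vorbis.Spec
open Vorbis.Spec.compute_codewords

set_option maxRecDepth 4000
set_option maxHeartbeats 4000000

namespace Vorbis.Spec.compute_codewords_4

/-- **SEGMENT 4: cut3 0x10827c → loop 1126 `for (i = 1; i <= len[k]; ++i) available[i] = 1U << (32 - i);` → cut8 0x108345** -/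
theorem cw4_walk {Lay : Layout} (hLay : Lay.hi = 0x1000000) {μ : Microarch} (hμ : UserX.MicroOK μ) {u₀ : State}
    (hcode : HasCodeNat Lay u₀ Vorbis.L.compute_codewords.entry Vorbis.Code.code_compute_codewords.nat Vorbis.L.compute_codewords.size)
    (hstore4 : Asan.SmallCheck Lay μ Vorbis.WayInv (Vorbis.CodeOK u₀) [.rax, .rcx, .rdx] 4 Vorbis.L.__asan_store4_noabort.entry)
    {others : List Obj} {frames : List (Nat × FrameLayout)} {u : State} {ret : Word}
    (hinvB : ShadowInv others (((u.reg .rsp).toNat - 248, Vorbis.Frames.compute_codewords) :: frames)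
      ((u.reg .rsp).toNat - 296) (cw_poisonedMem u))
    (he_room : 7340032 + 400 ≤ (u.reg .rsp).toNat)
    (he_top : (u.reg .rsp).toNat + 8 ≤ 8388608) (he_stack : Lay.Has (u.reg .rsp - 400) 408)
    {s : State} {ws : List Span} (k lk : Nat) (P : Word)
    (w_rip : s.rip = Vorbis.L.compute_codewords.cut3) (w_r13 : s.reg .r13 = Word.ofBV (BitVec.ofNat 32 k))
    (w_r14 : s.reg .r14 = P) (w_r15 : s.reg .r15 = (u.reg .rsp - 248) >>> 3)
    (w_kept : RegsKept cw_allRegs u s) (hb : CwBody u₀ u ret ws s)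
    (hP : 0x119d40 ≤ P.toNat ∧ P.toNat + 1 ≤ 0xC00000 ∧ ((u.reg .rsp).toNat + 8 ≤ P.toNat ∨ P.toNat + 1 ≤ 0x700000 ∨ 0x800000 ≤ P.toNat))
    (hlk : s.mem.readLE P 1 = lk) (hlk31 : lk ≤ 31)
    {Q : State → Prop}
    (hcont : ∀ s' : State, s'.rip = Vorbis.L.compute_codewords.cut8 →
      s'.reg .r13 = Word.ofBV (BitVec.ofNat 32 k + 1#32) → s'.reg .r12 = Word.ofBV 1#32 →
      UInt64.ofNat (s'.mem.readLE (u.reg .rsp - 256) 8) = (u.reg .rsp - 248) >>> 3 → s'.mem.readLE P 1 = lk →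
      Mem.SameExcept [⟨(u.reg .rsp).toNat - 304, (u.reg .rsp).toNat - 296⟩, ⟨(u.reg .rsp).toNat - 256, (u.reg .rsp).toNat - 248⟩,
        ⟨(u.reg .rsp).toNat - 216, (u.reg .rsp).toNat - 88⟩] s.mem s'.mem →
      CwBody u₀ u ret ws s' → ReachVia Lay μ Vorbis.WayInv s' Q) :
    ReachVia Lay μ Vorbis.WayInv s Q := by
  obtain ⟨w_rsp, w_eq, hdf, hmx, hsame, hbody, hs0, hs1, hs2, hs3, hs4, hs5, hs6, hsLen, hsC, hsVal, hsN⟩ := hb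
  have w_sse : SseOK s := ⟨hmx⟩
  unfold cw_allRegs at w_kept
  have hPhas : Lay.Has P 1 := by
    u_omega
  obtain ⟨m0, hm0⟩ : ∃ m0 : Mem, m0 = s.mem := ⟨_, rfl⟩
  rw [← hm0] at hcont
  u_walk hcode [hμ.vendor] until [Vorbis.L.compute_codewords.loop2] span [Vorbis.L.textLo, Vorbis.L.textHi] side (v_side)
  -- 0x1082a6: the head of loop 1126
  obtain ⟨i, hi13, hi1, hi2, hE0⟩ : ∃ i : Nat, s_108281.reg .rbx = Word.ofBV (BitVec.ofNat 32 i) ∧ 1 ≤ i ∧ i ≤ lk + 1 ∧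
      Mem.SameExcept [⟨(u.reg .rsp).toNat - 304, (u.reg .rsp).toNat - 296⟩, ⟨(u.reg .rsp).toNat - 256, (u.reg .rsp).toNat - 248⟩,
        ⟨(u.reg .rsp).toNat - 216, (u.reg .rsp).toNat - 88⟩] m0 s_108281.mem :=
    ⟨1, w_rbx, Nat.le_refl 1, by omega, by rw [w_mem, hm0]; exact Mem.SameExcept.refl _ _⟩
  rw [← w_mem] at hsame hbody hs0 hs1 hs2 hs3 hs4 hs5 hs6 hsLen hsC hsVal hsN hlk
  have hdf' : s_108281.flags .df = false := by
    rw [w_flags]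
    exact hdf
  have hmx' : s_108281.mxcsr &&& 0x1F80 = 0x1F80 := by
    rw [w_mxcsr]
    exact hmx
  have h0rsp := w_rsp
  have h0eq := w_eq
  clear w_mem w_flags w_mxcsr hdf hmx w_sse w_rbx hm0
  u_loop [i] (fun v => lk + 1 - (v.reg .rbx).toNat)
  u_walk hcode [hμ.vendor] until [Vorbis.L.compute_codewords.loop2, Vorbis.L.compute_codewords.cut8] span [Vorbis.L.textLo, Vorbis.L.textHi] side (v_side)
  · -- check_108299: `available[i]`, `1 ≤ i ≤ len[k] ≤ 31`, inside the frame's object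
    have hile : i ≤ lk := by
      rw [cw_toInt_lit32 _ (by omega), cw_zext8_toInt _ (by omega)] at hbr_1082ac
      omega
    have hun : ShadowUntouched (cw_poisonedMem u) s_108299.mem := by
      rw [w_mem]
      exact Mem.EqOn.trans hbody (Mem.EqOn.writeLE _ _ _ _ _ _ (by u_omega) (by u_omega))
    exact cw_check_available (u.reg .rsp).toNat hinvB hun (by omega) _ i (by omega)
      (cw_avail_addr (u.reg .rsp) i (by omega) he_room he_top)
  · -- side_code: the store to `available[i]` misses the text
    have hile : i ≤ lk := by
      rw [cw_toInt_lit32 _ (by omega), cw_zext8_toInt _ (by omega)] at hbr_1082ac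
      omega
    have hA := cw_avail_addr (u.reg .rsp) i (by omega) he_room he_top
    omega
  · -- the back edge
    have hile : i ≤ lk := by
      rw [cw_toInt_lit32 _ (by omega), cw_zext8_toInt _ (by omega)] at hbr_1082ac
      omega
    have hA := cw_avail_addr (u.reg .rsp) i (by omega) he_room he_top
    u_loop_back [i + 1]
    · -- still the shadow the prologue left: a dead return address and `available[i]` were written
      rw [w_mem]
      exact Mem.EqOn.step_writeLE _ _ _ (Mem.EqOn.step_writeLE _ _ _ hbody (by u_omega) (by u_omega)) (by omega) (by omega)
    · rw [w_rbx]
      exact cw_inc_lit32 i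
    · omega
    · omega
    · exact (show X86.User.abiInv s_1082a3 from by v_inv).1
    · exact (show X86.User.abiInv s_1082a3 from by v_inv).2
    · rw [w_rbx, cw_inc_lit32, cw_cnt_toNat _ (by omega), cw_cnt_toNat _ (by omega)]
      omega
  · -- the exit: 0x1082ae .. 0x1082bd → cut8
    have hbK : CwBody u₀ u ret ws s_108281 :=
      ⟨h0rsp, h0eq, hdf', hmx', hsame, hbody, hs0, hs1, hs2, hs3, hs4, hs5, hs6, hsLen, hsC, hsVal, hsN⟩
    have hE1 : Mem.EqOn ((u.reg .rsp).toNat - 296) ((u.reg .rsp).toNat - 256) s_108281.mem s_1082bd.mem := by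
      rw [w_mem]
      exact Mem.EqOn.writeLE _ _ _ _ _ _ (by u_omega) (by u_omega)
    have hE2 : Mem.EqOn ((u.reg .rsp).toNat - 48) ((u.reg .rsp).toNat + 8) s_108281.mem s_1082bd.mem := by
      rw [w_mem]
      exact Mem.EqOn.writeLE _ _ _ _ _ _ (by u_omega) (by u_omega)
    have hi : X86.User.abiInv s_1082bd := by
      v_inv
    have hslot : UInt64.ofNat (s_1082bd.mem.readLE (u.reg .rsp - 256) 8) = (u.reg .rsp - 248) >>> 3 := by
      u_resolve
    have hlk' : s_1082bd.mem.readLE P 1 = lk := by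
      u_frame hlk
    have hE0' : Mem.SameExcept [⟨(u.reg .rsp).toNat - 304, (u.reg .rsp).toNat - 296⟩,
        ⟨(u.reg .rsp).toNat - 256, (u.reg .rsp).toNat - 248⟩, ⟨(u.reg .rsp).toNat - 216, (u.reg .rsp).toNat - 88⟩]
        m0 s_1082bd.mem := by
      rw [w_mem]
      exact hE0.step_writeLE' _ _ _ (by u_omega) (by
        simp only [X86.User.inSpans_cons, X86.User.inSpans_nil, or_false]
        u_omega)
    refine (hcont s_1082bd w_rip w_r13 w_r12 hslot hlk' hE0'
      (hbK.carry2 hE1 hE2 he_room he_top w_rsp w_eq hi.1 hi.2 ?_ ?_)).mono (fun v h => Or.inl h)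
    · u_same
    · rw [w_mem]
      exact Mem.EqOn.step_writeLE _ _ _ hbody (by u_omega) (by u_omega)

end Vorbis.Spec.compute_codewords_4

theorem Vorbis.Spec.Worked.compute_codewords_4_ok : Vorbis.Spec.compute_codewords_4.Statement := by
  intro Lay hLay μ hμ u₀ hcode hstore4 others frames Blk u ret k v hat
  -- the entry state's facts, from the assertion
  have he := hat.entry
  v_entry he
  have hpre := hat.pre
  have hsh := hpre.shadow
  have hinvB := cw_inv_pushed hsh he_align he_room he_top
  have hklt := hat.k_lt
  have hn24 := cw_n_lt hpre
  have h31 := cw_len_le31 hpre hat.k_lt hat.used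
  -- where `len[k]` is: in the allocated block `len[0 .. n)`, off the stack and below the shadow
  have hw : Vorbis.L.textHi ≤ (u.reg .rsi).toNat ∧ (u.reg .rsi).toNat + (u.reg .rdx).toNat % 2 ^ 32 ≤ 0xC00000 ∧
      ((u.reg .rsp).toNat + 8 ≤ (u.reg .rsi).toNat ∨ (u.reg .rsi).toNat + (u.reg .rdx).toNat % 2 ^ 32 ≤ 0x700000 ∨
        0x800000 ≤ (u.reg .rsi).toNat) :=
    blk_where hpre.live hsh.inv hsh.offText (by omega) hpre.lens (by show 1 ≤ (u.reg .rdx).toNat % 2 ^ 32; omega)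
  have hPa := cw_idx_addr k (u.reg .rsi) (by omega) (by omega)
  have hlk := cw_len_kept hpre he_room he_top hat.body.same hat.k_lt _ hPa
  -- the walk, from the fields of `At3`
  refine Vorbis.Spec.compute_codewords_4.cw4_walk hLay hμ hcode hstore4 hinvB he_room he_top he_stack k
    (u.mem.u8 ((u.reg .rsi).toNat + k)) (Word.ofBV (BitVec.signExtend 64 (BitVec.ofNat 32 k)) + u.reg .rsi)
    hat.rip hat.r13 hat.r14 hat.r15 (cw_kept_all u v) hat.body ?_ hlk h31 ?_
  · -- `hP`
    have e : Vorbis.L.textHi = 0x119d40 := rfl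
    omega
  -- the exit: `AtMain (k + 1)`
  intro s' hrip hr13 hr12 hslot _ hsame hbody
  refine ReachVia.done ?_
  refine { entry := hat.entry, pre := hpre, body := hbody, rip := hrip, r13 := ?_, r12 := ?_, slot := hslot, i_le := ?_,
           val := ?_ }
  · rw [hr13]
    exact cw_inc_lit32 k
  · rw [hr12, hat.cnt]
  · omega
  · intro hsparse
    rw [hat.cnt]
    have hle := cw_used_le hpre hsparse (show k + 1 ≤ (u.reg .rdx).toNat % 2 ^ 32 by omega)
    rw [hat.cnt] at hle
    refine cw_val_carry hpre he_room he_top hsparse hle (hat.val hsparse) hsame ?_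
    intro w hwm
    simp only [List.mem_cons, List.not_mem_nil, or_false] at hwm
    rcases hwm with e | e | e
    · left
      rw [e]
      show 0x700000 ≤ (u.reg .rsp).toNat - 304 ∧ (u.reg .rsp).toNat - 296 ≤ (u.reg .rsp).toNat + 8
      omega
    · left
      rw [e]
      show 0x700000 ≤ (u.reg .rsp).toNat - 256 ∧ (u.reg .rsp).toNat - 248 ≤ (u.reg .rsp).toNat + 8
      omega
    · left
      rw [e]
      show 0x700000 ≤ (u.reg .rsp).toNat - 216 ∧ (u.reg .rsp).toNat - 88 ≤ (u.reg .rsp).toNat + 8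
      omega
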